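-- pv_equiv track=rewrite | github.com/mdheer/domain-informed-underwater-detection | src/trajectory/optical_flow.py | _count_image_files
-- ===== SOURCE A (Python) =====
-- def _count_image_files(filenames: list) -> int:
--     """
--     Counts the number of image files in a list of filenames.
--
--     Parameters:
--         filenames (list): A list of filenames.
--
--     Returns:
--         int: The count of image files.
--     """
--
--     # List of common image file extensions
--     image_extensions = [".jpg", ".jpeg", ".png", ".bmp", ".gif", ".tiff", ".webp"]
--
--     # Count filenames with image extensions
--     image_count = sum(
--         1
--         for filename in filenames
--         if any(filename.lower().endswith(ext) for ext in image_extensions)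
--     )
--
--     return image_count
-- ===== SOURCE B (Python) =====
-- def _count_image_files(filenames: list) -> int:
--     """Count filenames with image extensions (set lookup on the last extension)."""
--     exts = {"jpg", "jpeg", "png", "bmp", "gif", "tiff", "webp"}
--     count = 0
--     for filename in filenames:
--         name = filename.lower()
--         if "." in name and name.rsplit(".", 1)[1] in exts:
--             count += 1
--     return count
-- ===== Notes on version B (the rewrite author's own statement) =====
-- stated objective: faster
-- what changed: B replaces A's inner any()-loop over seven '.ext' suffix tests per filename with a single extraction of the part after the last dot (rsplit) and one set-membership lookup.
import Mathlib
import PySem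

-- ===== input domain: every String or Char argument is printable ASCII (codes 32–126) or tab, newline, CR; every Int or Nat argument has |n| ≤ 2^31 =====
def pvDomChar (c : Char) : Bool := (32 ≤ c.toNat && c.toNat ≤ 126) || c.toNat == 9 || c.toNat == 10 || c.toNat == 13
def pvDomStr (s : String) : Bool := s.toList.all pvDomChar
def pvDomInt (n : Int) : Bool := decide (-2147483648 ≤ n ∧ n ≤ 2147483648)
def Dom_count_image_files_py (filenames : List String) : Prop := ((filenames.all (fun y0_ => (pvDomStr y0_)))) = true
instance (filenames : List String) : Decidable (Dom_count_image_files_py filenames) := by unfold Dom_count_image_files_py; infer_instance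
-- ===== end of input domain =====

-- B (faster, measured): instead of testing all seven ".ext" suffixes per filename, B extracts the part
-- after the last dot once (rsplit) and does one set-membership test; return value only, no mutation.

-- ===== PORT A =====
def pvImageExts : List String := [".jpg", ".jpeg", ".png", ".bmp", ".gif", ".tiff", ".webp"]

def count_image_files_py (filenames : List String) : Int :=
  filenames.foldl
    (fun acc filename =>
      if pvImageExts.any (fun ext => PySem.Str.endswith (PySem.Str.lower filename) ext)
      then acc + 1 else acc) 0

-- ===== PORT B =====
-- the Python set literal {"jpg", …} of Source B
def pvExtSet : PySem.Set (List Char) :=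
  PySem.Set.ofList ["jpg".toList, "jpeg".toList, "png".toList, "bmp".toList, "gif".toList, "tiff".toList, "webp".toList]

-- hand port of name.rsplit(".", 1)[1], exact under the guard '"." in name' it is used behind:
-- the characters after the LAST '.' of the string.
def pvLastExt (cs : List Char) : List Char :=
  (cs.reverse.takeWhile (fun c => c != '.')).reverse

def count_image_files_py_alt (filenames : List String) : Int :=
  filenames.foldl
    (fun count filename =>
      let name := PySem.Str.lower filename
      if PySem.Str.isIn "." name && pvExtSet.contains (pvLastExt name.toList)
      then count + 1 else count) 0

-- ===== PRECONDITION & SPEC =====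
def Spec_count_image_files_py (filenames : List String) (out : Int) : Prop := out = count_image_files_py_alt filenames
instance (filenames : List String) (out : Int) : Decidable (Spec_count_image_files_py filenames out) := by unfold Spec_count_image_files_py; infer_instance

-- ===== CLAIM (what is proved, stated in full; the proofs are below) =====
def Claim_equal_count_image_files_py : Prop := ∀ (filenames : List String), Dom_count_image_files_py filenames → Spec_count_image_files_py filenames (count_image_files_py filenames)

-- ===== LEMMAS AND PROOFS =====

-- ending in w ++ "." (read on the reversed string) is: a dot occurs, and the run of the reversed
-- string before its first dot is exactly w
lemma pv_ext_key : ∀ (r w : List Char), '.' ∉ w →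
    ((w ++ ['.']) <+: r ↔ ('.' ∈ r ∧ r.takeWhile (fun c => c != '.') = w)) := by
  intro r
  induction r with
  | nil => intro w _; simp
  | cons c r' ih =>
      intro w hw
      by_cases hc : c = '.'
      · subst hc
        cases w with
        | nil => simp
        | cons a w' =>
            constructor
            · intro h
              rw [List.cons_append, List.cons_prefix_cons] at h
              exact absurd (by rw [h.1]; exact List.mem_cons_self : ('.':Char) ∈ a :: w') hw
            · rintro ⟨-, htw⟩
              simp at htw
      · cases w with
        | nil =>
            constructor
            · intro h
              rw [List.nil_append] at h
              exact absurd ((List.cons_prefix_cons.mp h).1.symm) hc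
            · rintro ⟨hd, htw⟩
              simp [hc] at htw
        | cons a w' =>
            have hw' : '.' ∉ w' := fun h => hw (List.mem_cons_of_mem _ h)
            constructor
            · intro h
              rw [List.cons_append, List.cons_prefix_cons] at h
              rcases h with ⟨hac, hpre⟩
              rcases (ih w' hw').mp hpre with ⟨hdot, htw⟩
              subst hac
              exact ⟨List.mem_cons_of_mem _ hdot, by simp [hc, htw]⟩
            · rintro ⟨hdot, htw⟩
              simp [hc] at htw
              rcases htw with ⟨hca, htw'⟩
              have hdot' : '.' ∈ r' := by
                rcases List.mem_cons.mp hdot with h | h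
                · exact absurd h.symm hc
                · exact h
              have := (ih w' hw').mpr ⟨hdot', htw'⟩
              subst hca
              rw [List.cons_append]
              exact List.cons_prefix_cons.mpr ⟨rfl, this⟩

-- ends with '.'::bare  ↔  a dot occurs and the part after the last dot is bare
lemma pv_endswith_dot (cs bare : List Char) (h : '.' ∉ bare) :
    PySem.Chars.endswith cs ('.' :: bare) = true ↔
      ('.' ∈ cs.reverse ∧ cs.reverse.takeWhile (fun c => c != '.') = bare.reverse) := by
  rw [PySem.Chars.endswith_iff, ← List.reverse_prefix, List.reverse_cons]
  exact pv_ext_key _ _ (by simpa using h)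

-- the two per-filename tests agree on every (already lowercased) character list
lemma pv_elem_eq (cs : List Char) :
    pvImageExts.any (fun ext => PySem.Chars.endswith cs ext.toList)
      = (PySem.Chars.isIn ['.'] cs && pvExtSet.contains (pvLastExt cs)) := by
  have h1 : PySem.Chars.endswith cs ('.' :: ['j','p','g']) = true ↔
      ('.' ∈ cs ∧ cs.reverse.takeWhile (fun c => c != '.') = ['g','p','j']) := by
    simpa [List.mem_reverse] using pv_endswith_dot cs ['j','p','g'] (by decide)
  have h2 : PySem.Chars.endswith cs ('.' :: ['j','p','e','g']) = true ↔
      ('.' ∈ cs ∧ cs.reverse.takeWhile (fun c => c != '.') = ['g','e','p','j']) := by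
    simpa [List.mem_reverse] using pv_endswith_dot cs ['j','p','e','g'] (by decide)
  have h3 : PySem.Chars.endswith cs ('.' :: ['p','n','g']) = true ↔
      ('.' ∈ cs ∧ cs.reverse.takeWhile (fun c => c != '.') = ['g','n','p']) := by
    simpa [List.mem_reverse] using pv_endswith_dot cs ['p','n','g'] (by decide)
  have h4 : PySem.Chars.endswith cs ('.' :: ['b','m','p']) = true ↔
      ('.' ∈ cs ∧ cs.reverse.takeWhile (fun c => c != '.') = ['p','m','b']) := by
    simpa [List.mem_reverse] using pv_endswith_dot cs ['b','m','p'] (by decide)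
  have h5 : PySem.Chars.endswith cs ('.' :: ['g','i','f']) = true ↔
      ('.' ∈ cs ∧ cs.reverse.takeWhile (fun c => c != '.') = ['f','i','g']) := by
    simpa [List.mem_reverse] using pv_endswith_dot cs ['g','i','f'] (by decide)
  have h6 : PySem.Chars.endswith cs ('.' :: ['t','i','f','f']) = true ↔
      ('.' ∈ cs ∧ cs.reverse.takeWhile (fun c => c != '.') = ['f','f','i','t']) := by
    simpa [List.mem_reverse] using pv_endswith_dot cs ['t','i','f','f'] (by decide)
  have h7 : PySem.Chars.endswith cs ('.' :: ['w','e','b','p']) = true ↔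
      ('.' ∈ cs ∧ cs.reverse.takeWhile (fun c => c != '.') = ['p','b','e','w']) := by
    simpa [List.mem_reverse] using pv_endswith_dot cs ['w','e','b','p'] (by decide)
  rw [Bool.eq_iff_iff]
  have hA : pvImageExts.any (fun ext => PySem.Chars.endswith cs ext.toList) = true ↔
      ('.' ∈ cs ∧ (cs.reverse.takeWhile (fun c => c != '.') = ['g','p','j'] ∨
        cs.reverse.takeWhile (fun c => c != '.') = ['g','e','p','j'] ∨
        cs.reverse.takeWhile (fun c => c != '.') = ['g','n','p'] ∨
        cs.reverse.takeWhile (fun c => c != '.') = ['p','m','b'] ∨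
        cs.reverse.takeWhile (fun c => c != '.') = ['f','i','g'] ∨
        cs.reverse.takeWhile (fun c => c != '.') = ['f','f','i','t'] ∨
        cs.reverse.takeWhile (fun c => c != '.') = ['p','b','e','w'])) := by
    simp only [pvImageExts, List.any_cons, List.any_nil, Bool.or_eq_true, Bool.false_eq_true, or_false]
    rw [show (".jpg" : String).toList = '.' :: ['j','p','g'] from rfl,
        show (".jpeg" : String).toList = '.' :: ['j','p','e','g'] from rfl,
        show (".png" : String).toList = '.' :: ['p','n','g'] from rfl,
        show (".bmp" : String).toList = '.' :: ['b','m','p'] from rfl,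
        show (".gif" : String).toList = '.' :: ['g','i','f'] from rfl,
        show (".tiff" : String).toList = '.' :: ['t','i','f','f'] from rfl,
        show (".webp" : String).toList = '.' :: ['w','e','b','p'] from rfl,
        h1, h2, h3, h4, h5, h6, h7,
        ← and_or_left, ← and_or_left, ← and_or_left, ← and_or_left, ← and_or_left, ← and_or_left]
  have hB : (PySem.Chars.isIn ['.'] cs && pvExtSet.contains (pvLastExt cs)) = true ↔
      ('.' ∈ cs ∧ (cs.reverse.takeWhile (fun c => c != '.') = ['g','p','j'] ∨
        cs.reverse.takeWhile (fun c => c != '.') = ['g','e','p','j'] ∨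
        cs.reverse.takeWhile (fun c => c != '.') = ['g','n','p'] ∨
        cs.reverse.takeWhile (fun c => c != '.') = ['p','m','b'] ∨
        cs.reverse.takeWhile (fun c => c != '.') = ['f','i','g'] ∨
        cs.reverse.takeWhile (fun c => c != '.') = ['f','f','i','t'] ∨
        cs.reverse.takeWhile (fun c => c != '.') = ['p','b','e','w'])) := by
    rw [Bool.and_eq_true, PySem.Chars.isIn_iff_infix, List.singleton_infix_iff,
        PySem.Set.contains_iff]
    unfold pvExtSet pvLastExt
    rw [PySem.Set.mem_ofList]
    simp only [List.mem_cons, List.not_mem_nil, or_false, List.reverse_eq_iff,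
      show ("jpg" : String).toList.reverse = ['g','p','j'] from rfl,
      show ("jpeg" : String).toList.reverse = ['g','e','p','j'] from rfl,
      show ("png" : String).toList.reverse = ['g','n','p'] from rfl,
      show ("bmp" : String).toList.reverse = ['p','m','b'] from rfl,
      show ("gif" : String).toList.reverse = ['f','i','g'] from rfl,
      show ("tiff" : String).toList.reverse = ['f','f','i','t'] from rfl,
      show ("webp" : String).toList.reverse = ['p','b','e','w'] from rfl]
  exact hA.trans hB.symm

-- the two loop bodies are the same function
lemma pv_step_eq :
    (fun (acc : Int) (filename : String) =>
      if pvImageExts.any (fun ext => PySem.Str.endswith (PySem.Str.lower filename) ext)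
      then acc + 1 else acc)
    = (fun (count : Int) (filename : String) =>
      let name := PySem.Str.lower filename
      if PySem.Str.isIn "." name && pvExtSet.contains (pvLastExt name.toList)
      then count + 1 else count) := by
  funext acc filename
  simp only [PySem.Str.endswith_eq, PySem.Str.isIn_eq, PySem.Str.toList_lower,
    show ("." : String).toList = ['.'] from rfl]
  rw [pv_elem_eq (PySem.Chars.lower filename.toList)]


-- ===== VERDICT (by name: the statement is the Claim_ definition above) =====
theorem count_image_files_py_spec : Claim_equal_count_image_files_py := by
  intro filenames _
  unfold Spec_count_image_files_py count_image_files_py count_image_files_py_alt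
  rw [pv_step_eq]
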